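-- pv_equiv track=rewrite | github.com/monxpronx/Coding-Test | 프로그래머스/0/181890. 왼쪽 오른쪽/왼쪽 오른쪽.py | solution
-- ===== SOURCE A (Python) =====
-- def solution(str_list):
--     answer = []
--
--     index_first_l = 0
--     index_first_r = 0
--     flag_l = 0
--     flag_r = 0
--     for i in range(len(str_list)):
--         if str_list[i] == 'l' and flag_l == 0:
--             index_first_l = i
--             flag_l = 1
--         if str_list[i] == 'r' and flag_r == 0:
--             index_first_r = i
--             flag_r = 1
--         if flag_l == 1 and flag_r == 1:
--             break
--     if flag_l == 1 and flag_r == 1: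
--         if index_first_l < index_first_r:
--             answer = str_list[:index_first_l]
--         elif index_first_r < index_first_l:
--             answer = str_list[index_first_r+1:]
--     elif flag_l == 1:
--         answer = str_list[:index_first_l]
--     elif flag_r == 1:
--         answer = str_list[index_first_r+1:]
--
--     return answer
-- ===== SOURCE B (Python) =====
-- def solution(str_list):
--     # Right-to-left fold: the state is the answer for the suffix already seen;
--     # a landmark overwrites it, so the leftmost landmark wins at the end.
--     tag, res = '', []
--     for i in range(len(str_list) - 1, -1, -1):
--         h = str_list[i]
--         if h == 'l':
--             tag, res = 'l', []
--         elif h == 'r':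
--             tag, res = 'r', str_list[i+1:]
--         elif tag == 'l':
--             res.append(h)
--     return res[::-1] if tag == 'l' else res
-- ===== Notes on version B (the rewrite author's own statement) =====
-- stated objective: alternative
-- what changed: Replaces A's left-to-right search for the two first-landmark indices (two flags, break, post-loop index comparison and slicing) by a right-to-left fold whose state is the answer of the suffix seen so far: each 'l'/'r' overwrites the state so the leftmost landmark wins, and the 'l'-prefix is built element by element instead of sliced.
import Mathlib
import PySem

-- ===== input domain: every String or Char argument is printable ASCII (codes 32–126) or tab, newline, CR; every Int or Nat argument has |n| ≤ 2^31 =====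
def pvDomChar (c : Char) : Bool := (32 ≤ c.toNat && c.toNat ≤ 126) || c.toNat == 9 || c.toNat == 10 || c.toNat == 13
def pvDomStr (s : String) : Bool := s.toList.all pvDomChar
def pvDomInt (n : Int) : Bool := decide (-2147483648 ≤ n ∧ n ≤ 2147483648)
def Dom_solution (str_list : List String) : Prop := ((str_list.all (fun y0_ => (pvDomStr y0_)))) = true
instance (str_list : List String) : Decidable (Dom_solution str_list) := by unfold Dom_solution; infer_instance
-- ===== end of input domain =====

-- B replaces A's left-to-right two-flag/two-index search + post-loop index comparison by a
-- right-to-left fold whose state is the answer of the suffix seen so far (landmarks overwrite,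
-- so the leftmost wins); objective: alternative (same O(n) cost, no flags/index comparison).

-- ===== PORT A =====
-- A's for-loop with its break, state = (index_first_l, index_first_r, flag_l, flag_r)
def solLoopA (sl : List String) : List Nat → Nat × Nat × Nat × Nat → Nat × Nat × Nat × Nat
  | [], st => st
  | i :: is, (il, ir, fl, fr) =>
      let (il, fl) := if sl.getD i "" = "l" ∧ fl = 0 then (i, 1) else (il, fl)
      let (ir, fr) := if sl.getD i "" = "r" ∧ fr = 0 then (i, 1) else (ir, fr)
      if fl = 1 ∧ fr = 1 then (il, ir, fl, fr) else solLoopA sl is (il, ir, fl, fr)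

-- A's post-loop if-chain
def solPostA (sl : List String) (st : Nat × Nat × Nat × Nat) : List String :=
  let (il, ir, fl, fr) := st
  if fl = 1 ∧ fr = 1 then
    if il < ir then sl.take il
    else if ir < il then sl.drop (ir + 1)
    else []
  else if fl = 1 then sl.take il
  else if fr = 1 then sl.drop (ir + 1)
  else []

def solution (str_list : List String) : List String :=
  solPostA str_list (solLoopA str_list (List.range str_list.length) (0, 0, 0, 0))

-- ===== PORT B =====
-- B's loop: i from len-1 downto 0, state (tag, res) = answer of the processed suffix
-- (res stored reversed while tag = "l"; reversed once at the end, as in Source B)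
def solLoopB (sl : List String) : List Nat → String × List String → String × List String
  | [], st => st
  | i :: is, (tag, res) =>
      let h := sl.getD i ""
      let st :=
        if h = "l" then ("l", ([] : List String))
        else if h = "r" then ("r", sl.drop (i + 1))
        else if tag = "l" then (tag, res ++ [h])
        else (tag, res)
      solLoopB sl is st

def solution_alt (str_list : List String) : List String :=
  let (tag, res) := solLoopB str_list (List.range str_list.length).reverse ("", [])
  if tag = "l" then res.reverse else res

-- ===== PRECONDITION & SPEC =====
def Spec_solution (str_list : List String) (out : List String) : Prop := out = solution_alt str_list
instance (str_list : List String) (out : List String) : Decidable (Spec_solution str_list out) := by unfold Spec_solution; infer_instance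

-- ===== CLAIM (what is proved, stated in full; the proofs are below) =====
def Claim_equal_solution : Prop := ∀ (str_list : List String), Dom_solution str_list → Spec_solution str_list (solution str_list)

-- ===== LEMMAS AND PROOFS =====

-- reference function: answer of a list, tagged by which landmark (if any) determined it
def specT : List String → String × List String
  | [] => ("", [])
  | h :: t =>
      if h = "l" then ("l", [])
      else if h = "r" then ("r", t)
      else
        let (tg, r) := specT t
        if tg = "l" then (tg, h :: r) else (tg, r)

-- B's loop state for suffix xs: same as specT but the "l"-prefix kept reversed
def stB (xs : List String) : String × List String :=
  let (tg, r) := specT xs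
  (tg, if tg = "l" then r.reverse else r)

-- A-side bridge: the early-return left scan (proof helper)
def scanL (full : List String) : Nat → List String → List String
  | _, [] => []
  | i, x :: xs =>
      if x = "l" then full.take i
      else if x = "r" then full.drop (i + 1)
      else scanL full (i + 1) xs

-- once flag_l is set at index il (< every remaining index), A's answer is take il
theorem postA_after_l (sl : List String) (is : List Nat) (il ir : Nat)
    (h : ∀ j ∈ is, il < j) :
    solPostA sl (solLoopA sl is (il, ir, 1, 0)) = sl.take il := by
  induction is generalizing ir with
  | nil => simp [solLoopA, solPostA]
  | cons j js ih =>
    have hj : il < j := h j (by simp)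
    simp only [solLoopA, List.getD]
    by_cases hr : sl[j]?.getD "" = "r"
    · simp [hr, solPostA, hj]
    · simpa [hr] using ih ir (fun k hk => h k (by simp [hk]))

-- once flag_r is set at index ir (< every remaining index), A's answer is drop (ir+1)
theorem postA_after_r (sl : List String) (is : List Nat) (il ir : Nat)
    (h : ∀ j ∈ is, ir < j) :
    solPostA sl (solLoopA sl is (il, ir, 0, 1)) = sl.drop (ir + 1) := by
  induction is generalizing il with
  | nil => simp [solLoopA, solPostA]
  | cons j js ih =>
    have hj : ir < j := h j (by simp)
    simp only [solLoopA, List.getD]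
    by_cases hl : sl[j]?.getD "" = "l"
    · simp [hl, solPostA, hj, Nat.lt_asymm hj]
    · simpa [hl] using ih il (fun k hk => h k (by simp [hk]))

theorem main_scan (sl : List String) (i : Nat) :
    solPostA sl (solLoopA sl (List.range' i (sl.length - i)) (0, 0, 0, 0))
      = scanL sl i (sl.drop i) := by
  by_cases hi : i < sl.length
  · have hk : sl.length - i = (sl.length - (i + 1)) + 1 := by omega
    have hrng : List.range' i (sl.length - i) = i :: List.range' (i + 1) (sl.length - (i + 1)) := by
      rw [hk, List.range'_succ]
    have hdrop : sl.drop i = sl[i] :: sl.drop (i + 1) := List.drop_eq_getElem_cons hi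
    have hget : sl[i]?.getD "" = sl[i] := by simp [List.getElem?_eq_getElem hi]
    rw [hrng, hdrop]
    simp only [solLoopA, scanL, List.getD, hget]
    by_cases hl : sl[i] = "l"
    · simp only [hl]
      simpa using postA_after_l sl _ i 0 (by intro j hj; obtain ⟨k, hk, rfl⟩ := List.mem_range'.mp hj; omega)
    · by_cases hr : sl[i] = "r"
      · simp only [hr]
        simpa using postA_after_r sl _ 0 i (by intro j hj; obtain ⟨k, hk, rfl⟩ := List.mem_range'.mp hj; omega)
      · have ih := main_scan sl (i + 1)
        simpa [hl, hr] using ih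
  · have h0 : sl.length - i = 0 := by omega
    have hd : sl.drop i = [] := List.drop_eq_nil_of_le (by omega)
    simp [h0, hd, solLoopA, scanL, solPostA]
termination_by sl.length - i

set_option maxRecDepth 8000 in
-- the left scan computes specT of the suffix, with the "l"-prefix shifted by sl.take i
theorem scanL_spec (sl : List String) (i : Nat) :
    scanL sl i (sl.drop i)
      = (if (specT (sl.drop i)).1 = "l" then sl.take i ++ (specT (sl.drop i)).2
         else (specT (sl.drop i)).2) := by
  by_cases hi : i < sl.length
  · have hdrop : sl.drop i = sl[i] :: sl.drop (i + 1) := List.drop_eq_getElem_cons hi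
    rw [hdrop]
    simp only [scanL, specT]
    by_cases hl : sl[i] = "l"
    · simp [hl]
    · by_cases hr : sl[i] = "r"
      · simp [hr]
      · have ih := scanL_spec sl (i + 1)
        have htake : sl.take (i + 1) = sl.take i ++ [sl[i]] := by
          rw [List.take_add_one]; simp [List.getElem?_eq_getElem hi]
        rcases hsp : specT (sl.drop (i + 1)) with ⟨tg, r⟩
        rw [hsp] at ih
        simp only [hl, hr, if_false] at ih ⊢
        by_cases htg : tg = "l"
        · rw [if_pos htg] at ih ⊢
          rw [ih, htake, List.append_assoc]
          simp [htg]
        · rw [if_neg htg] at ih ⊢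
          simpa [htg] using ih
  · have hd : sl.drop i = [] := List.drop_eq_nil_of_le (by omega)
    simp [hd, scanL, specT]
termination_by sl.length - i

-- one step of B's loop, at index j < length, turns the suffix-state at j+1 into the one at j
theorem stB_step (sl : List String) (j : Nat) (hj : j < sl.length) :
    (if sl.getD j "" = "l" then ("l", ([] : List String))
     else if sl.getD j "" = "r" then ("r", sl.drop (j + 1))
     else if (stB (sl.drop (j + 1))).1 = "l" then
       ((stB (sl.drop (j + 1))).1, (stB (sl.drop (j + 1))).2 ++ [sl.getD j ""])
     else stB (sl.drop (j + 1))) = stB (sl.drop j) := by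
  have hdrop : sl.drop j = sl[j] :: sl.drop (j + 1) := List.drop_eq_getElem_cons hj
  have hget : sl.getD j "" = sl[j] := by simp [List.getD, List.getElem?_eq_getElem hj]
  rw [hget]
  conv_rhs => rw [hdrop]
  by_cases hl : sl[j] = "l"
  · simp [hl, stB, specT]
  · by_cases hr : sl[j] = "r"
    · simp [hr, stB, specT]
    · rcases hsp : specT (sl.drop (j + 1)) with ⟨tg, r⟩
      by_cases htg : tg = "l"
      · simp [hl, hr, stB, specT, hsp, htg]
      · simp [hl, hr, stB, specT, hsp, htg]

-- B's loop over the reversed index range j .. j+k-1 maps the state at j+k to the state at j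
theorem loopB_inv (sl : List String) (k : Nat) : ∀ j, j + k ≤ sl.length →
    solLoopB sl (List.range' j k).reverse (stB (sl.drop (j + k))) = stB (sl.drop j) := by
  induction k with
  | zero => intro j _; simp [solLoopB]
  | succ k ih =>
    intro j hjk
    have hconcat : List.range' j (k + 1) = List.range' j k ++ [j + k] := by
      simpa using List.range'_concat (s := j) (n := k) (step := 1)
    rw [hconcat, List.reverse_append]
    rcases hst : stB (sl.drop (j + k + 1)) with ⟨tag, res⟩
    simp only [List.reverse_singleton, List.singleton_append, solLoopB]
    have hstep := stB_step sl (j + k) (by omega)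
    rw [hst] at hstep
    simp only at hstep
    rw [hstep]
    exact ih j (by omega)

-- ===== VERDICT (by name: the statement is the Claim_ definition above) =====
theorem solution_spec : Claim_equal_solution := by
  intro sl _
  unfold Spec_solution solution solution_alt
  -- A's side: value = scanL at 0 = answer part of specT
  have hA : solPostA sl (solLoopA sl (List.range sl.length) (0, 0, 0, 0)) = (specT sl).2 := by
    have h1 := main_scan sl 0
    have h2 := scanL_spec sl 0
    simp only [Nat.sub_zero, List.drop_zero, List.take_zero, List.nil_append] at h1 h2
    rw [List.range_eq_range']
    rw [h1, h2]
    split <;> rfl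
  -- B's side: fold over all indices reversed = stB of the whole list
  have hB : solLoopB sl (List.range sl.length).reverse ("", []) = stB sl := by
    have h0 : stB (sl.drop (0 + sl.length)) = ("", []) := by
      simp [stB, specT, List.drop_eq_nil_of_le]
    have := loopB_inv sl sl.length 0 (by omega)
    rw [h0] at this
    simpa [List.range_eq_range'] using this
  rw [hA, hB]
  rcases hsp : specT sl with ⟨tg, r⟩
  simp only [stB, hsp]
  by_cases htg : tg = "l" <;> simp [htg]
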